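-- pv_equiv track=rewrite | github.com/g0v/OpenTransLive | live_server/app/scribe_manager.py | _is_hallucination
-- ===== SOURCE A (Python) =====
-- def _is_hallucination(text: str) -> bool:
--     """Detect common ASR hallucinations: repetitive patterns or pure digit sequences."""
--     if len(text) < 8:
--         return False
--
--     lower = text.lower().replace(" ", "")
--
--     # Detect repetitive unit patterns: hahahaha, lalalala, hmm hmm hmm hmm, etc.
--     for unit_len in range(1, min(len(lower) // 4, 8) + 1):
--         unit = lower[:unit_len]
--         reps = len(lower) // unit_len
--         if reps >= 4 and lower.startswith(unit * reps):
--             return True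
--
--     return False
-- ===== SOURCE B (Python) =====
-- def _is_hallucination(text: str) -> bool:
--     """Detect common ASR hallucinations: repetitive patterns or pure digit sequences."""
--     if len(text) < 8:
--         return False
--     lower = text.lower().replace(" ", "")
--     n = len(lower)
--     # Single left-to-right scan over the characters, pruning candidate periods:
--     # period u (with at least 4 full repetitions, i.e. n//u >= 4) survives the scan
--     # iff lower[i] == lower[i-u] for every i in [u, (n//u)*u), i.e. iff the first
--     # (n//u)*u characters are made of copies of lower[:u].
--     alive = [u for u in range(1, 9) if n // u >= 4]
--     for i in range(1, n):
--         alive = [u for u in alive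
--                  if not (u <= i < (n // u) * u and lower[i] != lower[i - u])]
--         if not alive:
--             return False
--     return bool(alive)
-- ===== Notes on version B (the rewrite author's own statement) =====
-- stated objective: alternative
-- what changed: A loops over candidate unit lengths and, for each, rebuilds unit*reps and prefix-matches it; B makes a single left-to-right scan over the characters, maintaining the set of still-viable periods u in 1..8 (those with n//u >= 4) and pruning u whenever lower[i] != lower[i-u] inside u's repeated prefix, returning False as soon as no candidate survives.
import Mathlib
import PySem

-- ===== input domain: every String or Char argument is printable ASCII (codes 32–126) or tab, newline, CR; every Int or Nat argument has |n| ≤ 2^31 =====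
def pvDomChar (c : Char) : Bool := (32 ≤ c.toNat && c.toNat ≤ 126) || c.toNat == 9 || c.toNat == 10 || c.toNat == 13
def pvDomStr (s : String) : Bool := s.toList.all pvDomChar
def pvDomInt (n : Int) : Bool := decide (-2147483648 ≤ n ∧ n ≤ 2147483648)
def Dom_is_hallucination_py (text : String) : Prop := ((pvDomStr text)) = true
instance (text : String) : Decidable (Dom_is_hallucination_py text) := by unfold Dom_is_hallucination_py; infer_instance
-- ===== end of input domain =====

-- B replaces A's loop over unit lengths (rebuild unit*reps, prefix-match) by ONE left-to-right
-- scan over the characters that prunes a list of candidate periods (objective: alternative).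

-- ===== PORT A =====
-- A's for-loop with early `return True`; Python string repetition `unit * reps` (reps ≥ 0 here)
-- is ported by hand as (List.replicate reps.toNat unit).flatten — exact for nonnegative reps.
def pvLoopA (lower : List Char) (n : Int) : List Int → Bool
  | [] => false
  | u :: rest =>
      let unit := PySem.List.slice lower none (some u)
      let reps := PySem.Int.floordiv n u
      if decide (4 ≤ reps) && PySem.Chars.startswith lower ((List.replicate reps.toNat unit).flatten) then
        true
      else pvLoopA lower n rest

def is_hallucination_py (text : String) : Bool :=
  if PySem.Str.len text < 8 then false
  else
    let lower := (PySem.Str.replace (PySem.Str.lower text) " " "").toList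
    let n : Int := PySem.Chars.len lower
    pvLoopA lower n (PySem.List.pyRange 1 (min (PySem.Int.floordiv n 4) 8 + 1) 1)

-- ===== PORT B =====
-- the list-comprehension filter `not (u <= i < (n//u)*u and lower[i] != lower[i-u])`;
-- both indices are in range whenever the guards hold, so pyGet? option equality is exact.
def pvKeepB (lower : List Char) (n : Int) (i : Int) (u : Int) : Bool :=
  !(decide (u ≤ i) && decide (i < PySem.Int.floordiv n u * u) &&
    !(PySem.List.pyGet? lower i == PySem.List.pyGet? lower (i - u)))

-- `alive = [u for u in range(1, 9) if n // u >= 4]`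
def pvCandsB (n : Int) : List Int :=
  (PySem.List.pyRange 1 9 1).filter (fun u => decide (4 ≤ PySem.Int.floordiv n u))

-- B's for-loop over i with the early `return False` and final `bool(alive)`
def pvLoopB (lower : List Char) (n : Int) (alive : List Int) : List Int → Bool
  | [] => !alive.isEmpty
  | i :: rest =>
      let alive' := alive.filter (pvKeepB lower n i)
      if alive'.isEmpty then false else pvLoopB lower n alive' rest

def is_hallucination_py_alt (text : String) : Bool :=
  if PySem.Str.len text < 8 then false
  else
    let lower := (PySem.Str.replace (PySem.Str.lower text) " " "").toList
    let n : Int := PySem.Chars.len lower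
    pvLoopB lower n (pvCandsB n) (PySem.List.pyRange 1 n 1)

-- ===== PRECONDITION & SPEC =====
def Spec_is_hallucination_py (text : String) (out : Bool) : Prop := out = is_hallucination_py_alt text
instance (text : String) (out : Bool) : Decidable (Spec_is_hallucination_py text out) := by unfold Spec_is_hallucination_py; infer_instance

-- ===== CLAIM (what is proved, stated in full; the proofs are below) =====
def Claim_equal_is_hallucination_py : Prop := ∀ (text : String), Dom_is_hallucination_py text → Spec_is_hallucination_py text (is_hallucination_py text)

-- ===== LEMMAS AND PROOFS =====

theorem pv_length_flatten_replicate {α : Type} (r : Nat) (q : List α) :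
    (List.replicate r q).flatten.length = r * q.length := by
  induction r with
  | zero => simp
  | succ r ih => simp [List.replicate_succ, ih, Nat.succ_mul, Nat.add_comm]

theorem pv_getElem?_flatten_replicate {α : Type} (r : Nat) (q : List α) (i : Nat)
    (_hq : 0 < q.length) (hi : i < r * q.length) :
    (List.replicate r q).flatten[i]? = q[i % q.length]? := by
  induction r generalizing i with
  | zero => omega
  | succ r ih =>
      rw [List.replicate_succ, List.flatten_cons]
      by_cases h : i < q.length
      · rw [List.getElem?_append_left h, Nat.mod_eq_of_lt h]
      · have h1 : i - q.length < r * q.length := by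
          rw [Nat.add_mul, Nat.one_mul] at hi; omega
        rw [List.getElem?_append_right (by omega), ih (i - q.length) h1]
        congr 1
        conv_rhs => rw [show i = (i - q.length) + q.length by omega]
        rw [Nat.add_mod_right]

-- core characterisation: r copies of the k-prefix form a prefix of l ↔ pointwise back-shift by k
theorem pv_startswith_iff_shift {α : Type} (l : List α) (k r : Nat) (hk : 1 ≤ k) (hr : 1 ≤ r)
    (hm : r * k ≤ l.length) :
    ((List.replicate r (l.take k)).flatten <+: l ↔
      ∀ j, k ≤ j → j < r * k → l[j]? = l[j - k]?) := by
  have hkn : k ≤ l.length := le_trans (by nlinarith) hm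
  have hlenq : (l.take k).length = k := by simp [Nat.min_eq_left hkn]
  have hQ : ((List.replicate r (l.take k)).flatten <+: l) ↔
      (∀ j, j < r * k → l[j]? = l[j % k]?) := by
    rw [List.prefix_iff_eq_take, pv_length_flatten_replicate, hlenq]
    constructor
    · intro he j hj
      have e1 : ((List.replicate r (l.take k)).flatten)[j]? = (l.take (r * k))[j]? := by rw [he]
      rw [pv_getElem?_flatten_replicate r (l.take k) j (by omega) (by rw [hlenq]; exact hj),
          hlenq, List.getElem?_take, List.getElem?_take] at e1
      have hjk : j % k < k := Nat.mod_lt j (by omega)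
      simp only [hjk, if_true, hj, if_true] at e1
      exact e1.symm
    · intro hq
      apply List.ext_getElem?
      intro j
      by_cases hj : j < r * k
      · rw [pv_getElem?_flatten_replicate r (l.take k) j (by omega) (by rw [hlenq]; exact hj),
            hlenq, List.getElem?_take, List.getElem?_take]
        have hjk : j % k < k := Nat.mod_lt j (by omega)
        simp only [hjk, if_true, hj, if_true]
        exact (hq j hj).symm
      · have hflen : ((List.replicate r (l.take k)).flatten).length = r * k := by
          rw [pv_length_flatten_replicate, hlenq]
        rw [List.getElem?_eq_none (by omega), List.getElem?_take]
        simp [hj]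
  rw [hQ]
  constructor
  · intro hq j hkj hj
    have e1 := hq j hj
    have e2 := hq (j - k) (by omega)
    rw [e1, e2]
    congr 1
    conv_lhs => rw [show j = (j - k) + k by omega]
    rw [Nat.add_mod_right]
  · intro hs j
    induction j using Nat.strong_induction_on with
    | _ j ih =>
      intro hj
      by_cases h : j < k
      · rw [Nat.mod_eq_of_lt h]
      · have e1 := hs j (by omega) hj
        have e2 := ih (j - k) (by omega) (by omega)
        rw [e1, e2]
        congr 1
        conv_rhs => rw [show j = (j - k) + k by omega]
        rw [Nat.add_mod_right]

-- A's early-return loop is `any` over its range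
theorem pv_loopA_eq_any (l : List Char) (n : Int) (us : List Int) :
    pvLoopA l n us = us.any (fun u =>
      decide (4 ≤ PySem.Int.floordiv n u) &&
      PySem.Chars.startswith l ((List.replicate (PySem.Int.floordiv n u).toNat
        (PySem.List.slice l none (some u))).flatten)) := by
  induction us with
  | nil => rfl
  | cons u rest ih =>
      rw [List.any_cons, ← ih]
      show (if _ then true else _) = _
      split_ifs with hc
      · simp [hc]
      · simp [Bool.eq_false_iff.mpr hc]

-- B's pruning scan is `any` over the candidates of `all` over the scanned positions
theorem pv_loopB_eq_any (l : List Char) (n : Int) (alive : List Int) (is : List Int) :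
    pvLoopB l n alive is = alive.any (fun u => is.all (fun i => pvKeepB l n i u)) := by
  induction is generalizing alive with
  | nil =>
      show (!alive.isEmpty) = _
      cases alive <;> simp
  | cons i rest ih =>
      show (if _ then false else pvLoopB l n (alive.filter (pvKeepB l n i)) rest) = _
      split_ifs with he
      · rw [List.isEmpty_iff, List.filter_eq_nil_iff] at he
        symm
        rw [List.any_eq_false]
        intro u hu
        simp only [List.all_cons, Bool.and_eq_true, not_and]
        intro hk
        exact absurd hk (by simpa using he u hu)
      · rw [ih, List.any_filter]
        apply PySem.List.any_congr_mem
        intro u _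
        simp [List.all_cons]


theorem pv_unit_iff (l : List Char) (k : Nat) (hk : 1 ≤ k) (h4 : 4 ≤ l.length / k) :
    ((List.replicate (PySem.Int.floordiv (l.length:Int) (k:Int)).toNat
      (PySem.List.slice l none (some (k:Int)))).flatten <+: l)
    ↔ (∀ i ∈ PySem.List.pyRange 1 (l.length:Int) 1, pvKeepB l (l.length:Int) i (k:Int) = true) := by
  have hfd : PySem.Int.floordiv (l.length:Int) (k:Int) = ((l.length / k : Nat) : Int) :=
    PySem.Int.floordiv_natCast _ _
  set r : Nat := l.length / k with hr
  have hm : r * k ≤ l.length := Nat.div_mul_le_self l.length k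
  rw [hfd, Int.toNat_natCast, PySem.List.slice_to_natCast,
    pv_startswith_iff_shift l k r hk (by omega) hm]
  constructor
  · intro hs i hi
    rw [PySem.List.mem_pyRange_one] at hi
    simp only [pvKeepB, hfd]
    have e2 : ((r:Int) * (k:Int)) = ((r*k : Nat) : Int) := by push_cast; ring
    rw [e2]
    simp only [Bool.not_eq_eq_eq_not, Bool.not_true, Bool.and_eq_false_imp,
      Bool.and_eq_true, decide_eq_true_iff]
    rintro ⟨hki, hirk⟩
    obtain ⟨j, rfl⟩ : ∃ j : Nat, i = (j:Nat) := ⟨i.toNat, by omega⟩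
    have hkj : k ≤ j := by exact_mod_cast hki
    have hjrk : j < r * k := by exact_mod_cast hirk
    have ejk : (j:Int) - (k:Int) = ((j - k : Nat) : Int) := by push_cast [hkj]; ring
    rw [ejk, PySem.List.pyGet?_natCast, PySem.List.pyGet?_natCast]
    simp [hs j hkj hjrk]
  · intro ha j hkj hjrk
    have h1 := ha (j:Int) (by
      rw [PySem.List.mem_pyRange_one]
      constructor
      · exact_mod_cast Nat.one_le_iff_ne_zero.mpr (by omega)
      · exact_mod_cast lt_of_lt_of_le hjrk hm)
    simp only [pvKeepB, hfd] at h1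
    have e2 : ((r:Int) * (k:Int)) = ((r*k : Nat) : Int) := by push_cast; ring
    rw [e2] at h1
    simp only [Bool.not_eq_eq_eq_not, Bool.not_true, Bool.and_eq_false_imp,
      Bool.and_eq_true, decide_eq_true_iff] at h1
    have h2 := h1 ⟨by exact_mod_cast hkj, by exact_mod_cast hjrk⟩
    have ejk : (j:Int) - (k:Int) = ((j - k : Nat) : Int) := by push_cast [hkj]; ring
    rw [ejk, PySem.List.pyGet?_natCast, PySem.List.pyGet?_natCast] at h2
    simpa using h2

-- ===== VERDICT (by name: the statement is the Claim_ definition above) =====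
theorem is_hallucination_py_spec : Claim_equal_is_hallucination_py := by
  intro text _
  unfold Spec_is_hallucination_py is_hallucination_py is_hallucination_py_alt
  by_cases h : PySem.Str.len text < 8
  · rw [if_pos h, if_pos h]
  · rw [if_neg h, if_neg h]
    simp only [PySem.Chars.len_eq]
    set l := (PySem.Str.replace (PySem.Str.lower text) " " "").toList with hl
    rw [pv_loopA_eq_any, pv_loopB_eq_any]
    unfold pvCandsB
    rw [List.any_filter, Bool.eq_iff_iff, List.any_eq_true, List.any_eq_true]
    constructor
    · rintro ⟨u, hu, hcond⟩
      rw [PySem.List.mem_pyRange_one] at hu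
      rw [Bool.and_eq_true, decide_eq_true_iff] at hcond
      obtain ⟨hur, hsw⟩ := hcond
      obtain ⟨k, rfl⟩ : ∃ k : Nat, u = (k:Nat) := ⟨u.toNat, by omega⟩
      have hk : 1 ≤ k := by exact_mod_cast hu.1
      have h4 : 4 ≤ l.length / k := by
        rw [PySem.Int.floordiv_natCast] at hur; exact_mod_cast hur
      have hd4 : 4 * k ≤ l.length := (Nat.le_div_iff_mul_le (by omega)).mp h4
      refine ⟨(k:Int), ?_, ?_⟩
      · rw [PySem.List.mem_pyRange_one]
        have h2 := hu.2
        have hfd4 : PySem.Int.floordiv ((l.length:Nat):Int) 4 = ((l.length / 4 : Nat):Int) := by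
          exact_mod_cast PySem.Int.floordiv_natCast l.length 4
        rw [hfd4] at h2
        omega
      · rw [Bool.and_eq_true, decide_eq_true_iff, List.all_eq_true]
        exact ⟨hur, (pv_unit_iff l k hk h4).mp ((PySem.Chars.startswith_iff _ _).mp hsw)⟩
    · rintro ⟨u, hu, hcond⟩
      rw [PySem.List.mem_pyRange_one] at hu
      rw [Bool.and_eq_true, decide_eq_true_iff, List.all_eq_true] at hcond
      obtain ⟨hur, hall⟩ := hcond
      obtain ⟨k, rfl⟩ : ∃ k : Nat, u = (k:Nat) := ⟨u.toNat, by omega⟩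
      have hk : 1 ≤ k := by exact_mod_cast hu.1
      have h4 : 4 ≤ l.length / k := by
        rw [PySem.Int.floordiv_natCast] at hur; exact_mod_cast hur
      have hd4 : 4 * k ≤ l.length := (Nat.le_div_iff_mul_le (by omega)).mp h4
      have hk4 : k ≤ l.length / 4 := (Nat.le_div_iff_mul_le (by omega)).mpr (by omega)
      refine ⟨(k:Int), ?_, ?_⟩
      · rw [PySem.List.mem_pyRange_one]
        have hfd4 : PySem.Int.floordiv ((l.length:Nat):Int) 4 = ((l.length / 4 : Nat):Int) := by
          exact_mod_cast PySem.Int.floordiv_natCast l.length 4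
        rw [hfd4]
        have hk8 : (k:Int) < 9 := by exact_mod_cast hu.2
        have : ((k:Nat):Int) ≤ ((l.length / 4 : Nat):Int) := by exact_mod_cast hk4
        omega
      · rw [Bool.and_eq_true, decide_eq_true_iff]
        exact ⟨hur, (PySem.Chars.startswith_iff _ _).mpr ((pv_unit_iff l k hk h4).mpr hall)⟩
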